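-- pv_equiv track=rewrite | github.com/sinisterdaddy/DSA-Data-Structures-Algorithms- | DSA[Data Structures & Algorithm]/QUESTIONS/Q1/Untitled-2.py | max_length_substring
-- ===== SOURCE A (Python) =====
-- def max_length_substring(s, t, K):
--     n = len(s)
--     max_length = 0
--
--     for i in range(n):
--         cost = 0
--         j = i
--         while j < n and cost + abs(ord(s[j]) - ord(t[j])) <= K:
--             cost += abs(ord(s[j]) - ord(t[j]))
--             j += 1
--         max_length = max(max_length, j - i)
--
--     return max_length
-- ===== SOURCE B (Python) =====
-- def max_length_substring(s, t, K):
--     # Sliding window (two pointers): the window end never moves backward,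
--     # so the whole scan is O(n) instead of restarting from every start index.
--     n = len(s)
--     best = 0
--     j = 0
--     cost = 0  # sum of costs over s[i:j]
--     for i in range(n):
--         if j < i:
--             j = i
--             cost = 0
--         while j < n and cost + abs(ord(s[j]) - ord(t[j])) <= K:
--             cost += abs(ord(s[j]) - ord(t[j]))
--             j += 1
--         if j - i > best:
--             best = j - i
--         if j > i:
--             cost -= abs(ord(s[i]) - ord(t[i]))
--     return best
-- ===== Notes on version B (the rewrite author's own statement) =====
-- stated objective: faster
-- what changed: A restarts the cost scan from every start index i (nested loops); B slides a single two-pointer window whose end never moves backward, subtracting the leaving cost instead of rescanning.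
import Mathlib
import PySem

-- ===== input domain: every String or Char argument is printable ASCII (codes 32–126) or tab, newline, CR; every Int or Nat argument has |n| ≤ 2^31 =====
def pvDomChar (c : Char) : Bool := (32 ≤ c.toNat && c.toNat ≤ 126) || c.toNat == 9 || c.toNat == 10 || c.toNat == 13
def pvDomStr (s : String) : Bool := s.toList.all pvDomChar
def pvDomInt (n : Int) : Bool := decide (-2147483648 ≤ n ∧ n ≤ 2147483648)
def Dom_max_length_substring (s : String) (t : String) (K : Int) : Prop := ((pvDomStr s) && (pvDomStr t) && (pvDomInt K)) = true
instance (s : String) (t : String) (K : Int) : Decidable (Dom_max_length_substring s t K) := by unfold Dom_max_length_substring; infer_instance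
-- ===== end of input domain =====

-- B replaces A's per-start rescan by a single sliding window (two pointers);
-- same return value wherever A returns (same IndexError behaviour outside Pre_).

-- ===== PORT A =====
def pvOrd (c : Char) : Int := Int.ofNat c.toNat

-- abs(ord(s[j]) - ord(t[j])); every index A reaches is in range under Pre_
def pvCostAt (sl tl : List Char) (j : Nat) : Int :=
  |pvOrd (sl.getD j ' ') - pvOrd (tl.getD j ' ')|

-- A's inner `while j < n and cost + abs(...) <= K` loop
-- (fuel = n - j is only a totality device: it runs out exactly when j ≥ n)
def aGo (sl tl : List Char) (K : Int) (n : Nat) : Nat → Nat → Int → Nat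
  | 0, j, _ => j
  | fuel + 1, j, cost =>
    if j < n ∧ cost + pvCostAt sl tl j ≤ K then
      aGo sl tl K n fuel (j + 1) (cost + pvCostAt sl tl j)
    else j

def max_length_substring (s : String) (t : String) (K : Int) : Int :=
  let sl := s.toList
  let tl := t.toList
  let n := sl.length
  Int.ofNat ((List.range n).foldl (fun m i => max m (aGo sl tl K n (n - i) i 0 - i)) 0)

-- ===== PORT B =====
-- B's inner `while j < n and cost + abs(...) <= K` loop (fuel as above); returns (j, cost)
def bExtend (sl tl : List Char) (K : Int) (n : Nat) : Nat → Nat → Int → Nat × Int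
  | 0, j, cost => (j, cost)
  | fuel + 1, j, cost =>
    if j < n ∧ cost + pvCostAt sl tl j ≤ K then
      bExtend sl tl K n fuel (j + 1) (cost + pvCostAt sl tl j)
    else (j, cost)

-- one iteration of B's `for i in range(n)` loop; state = (j, cost, best)
def bStep (sl tl : List Char) (K : Int) (n : Nat) (st : Nat × Int × Nat) (i : Nat) : Nat × Int × Nat :=
  let j0 := if st.1 < i then i else st.1
  let cost0 := if st.1 < i then 0 else st.2.1
  let e := bExtend sl tl K n (n - j0) j0 cost0
  let best := if st.2.2 < e.1 - i then e.1 - i else st.2.2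
  let cost' := if i < e.1 then e.2 - pvCostAt sl tl i else e.2
  (e.1, cost', best)

def max_length_substring_alt (s : String) (t : String) (K : Int) : Int :=
  let sl := s.toList
  let tl := t.toList
  let n := sl.length
  Int.ofNat (((List.range n).foldl (bStep sl tl K n) (0, 0, 0)).2.2)

-- ===== PRECONDITION & SPEC =====
-- Pre_ excludes len(t) < len(s), on which A raises IndexError (t[j] out of range); B raises there too.
def Pre_max_length_substring (s : String) (t : String) (K : Int) : Prop :=
  s.toList.length ≤ t.toList.length
instance (s : String) (t : String) (K : Int) : Decidable (Pre_max_length_substring s t K) := by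
  unfold Pre_max_length_substring; infer_instance

def pvWitness_max_length_substring : String × String × Int := ("abc", "abd", 5)

def Spec_max_length_substring (s : String) (t : String) (K : Int) (out : Int) : Prop :=
  out = max_length_substring_alt s t K
instance (s : String) (t : String) (K : Int) (out : Int) : Decidable (Spec_max_length_substring s t K out) := by
  unfold Spec_max_length_substring; infer_instance

-- ===== CLAIM (what is proved, stated in full; the proofs are below) =====
def Claim_equal_max_length_substring : Prop := ∀ (s : String) (t : String) (K : Int), Dom_max_length_substring s t K → Pre_max_length_substring s t K → Spec_max_length_substring s t K (max_length_substring s t K)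

-- ===== LEMMAS AND PROOFS =====

-- the costs as a list, and its prefix sums (proof devices only)
def pvC (sl tl : List Char) : List Int := List.zipWith (fun a b => |pvOrd a - pvOrd b|) sl tl

def pvP (c : List Int) (j : Nat) : Int := (c.take j).sum

theorem pvCostAt_eq (sl tl : List Char) (hlen : sl.length ≤ tl.length) (j : Nat)
    (hj : j < sl.length) : pvCostAt sl tl j = (pvC sl tl).getD j 0 := by
  have hcl : (pvC sl tl).length = sl.length := by
    simp [pvC, List.length_zipWith]; omega
  rw [List.getD_eq_getElem _ 0 (by omega)]
  unfold pvC
  rw [List.getElem_zipWith]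
  unfold pvCostAt
  rw [List.getD_eq_getElem sl ' ' hj, List.getD_eq_getElem tl ' ' (by omega)]

theorem pvP_succ (c : List Int) (j : Nat) : pvP c (j + 1) = pvP c j + c.getD j 0 := by
  by_cases hj : j < c.length
  · rw [pvP, pvP, List.sum_take_succ c j hj, List.getD_eq_getElem c 0 hj]
  · rw [pvP, pvP, List.take_of_length_le (by omega), List.take_of_length_le (by omega),
      List.getD_eq_default c 0 (by omega)]
    simp

theorem pvP_mono (c : List Int) (hc : ∀ x ∈ c, 0 ≤ x) {i j : Nat} (h : i ≤ j) :
    pvP c i ≤ pvP c j := by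
  induction j, h using Nat.le_induction with
  | base => exact le_refl _
  | succ j hij ih =>
    rw [pvP_succ]
    have : 0 ≤ c.getD j 0 := by
      by_cases hj : j < c.length
      · rw [List.getD_eq_getElem c 0 hj]; exact hc _ (List.getElem_mem hj)
      · rw [List.getD_eq_default c 0 (by omega)]
    omega

def bExtendC (c : List Int) (K : Int) (n : Nat) : Nat → Nat → Int → Nat × Int
  | 0, j, cost => (j, cost)
  | fuel + 1, j, cost =>
    if j < n ∧ cost + c.getD j 0 ≤ K then
      bExtendC c K n fuel (j + 1) (cost + c.getD j 0)
    else (j, cost)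

-- under Pre_, the inline cost of bExtend agrees with the cost list (in-range accesses only)
theorem bExtend_costAt (sl tl : List Char) (K : Int) (hlen : sl.length ≤ tl.length) :
    ∀ fuel j cost,
    bExtend sl tl K sl.length fuel j cost =
      bExtendC (pvC sl tl) K sl.length fuel j cost := by
  intro fuel
  induction fuel with
  | zero => intro j cost; rfl
  | succ fuel ih =>
    intro j cost
    rw [bExtend, bExtendC]
    by_cases hj : j < sl.length
    · rw [pvCostAt_eq sl tl hlen j hj]
      split
      · exact ih (j + 1) _
      · rfl
    · have h1 : ¬(j < sl.length ∧ cost + (pvC sl tl).getD j 0 ≤ K) := by omega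
      have h2 : ¬(j < sl.length ∧ cost + pvCostAt sl tl j ≤ K) := by omega
      rw [if_neg h1, if_neg h2]

-- the run of bExtendC, fully characterised (fuel sufficient: n ≤ j + fuel)
theorem bExtendC_run (c : List Int) (K : Int) (n : Nat) :
    ∀ fuel j cost, n ≤ j + fuel →
    j ≤ (bExtendC c K n fuel j cost).1 ∧
    (bExtendC c K n fuel j cost).2 = cost + pvP c (bExtendC c K n fuel j cost).1 - pvP c j ∧
    (j ≤ n → (bExtendC c K n fuel j cost).1 ≤ n) ∧
    (∀ l, j ≤ l → l < (bExtendC c K n fuel j cost).1 → cost + (pvP c (l + 1) - pvP c j) ≤ K) ∧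
    ((bExtendC c K n fuel j cost).1 < n → cost + (pvP c ((bExtendC c K n fuel j cost).1 + 1) - pvP c j) > K) := by
  intro fuel
  induction fuel with
  | zero =>
    intro j cost hf
    simp only [bExtendC]
    exact ⟨le_refl _, by ring, fun hj => hj, fun l h1 h2 => absurd h2 (by omega),
      fun h => absurd h (by omega)⟩
  | succ fuel ih =>
    intro j cost hf
    rw [bExtendC]
    split
    case isTrue h =>
      obtain ⟨ih1, ih2, ih3, ih4, ih5⟩ := ih (j + 1) (cost + c.getD j 0) (by omega)
      refine ⟨by omega, ?_, fun _ => ih3 (by omega), ?_, ?_⟩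
      · rw [ih2, pvP_succ]; ring
      · intro l hjl hl
        have hpj : pvP c (j + 1) = pvP c j + c.getD j 0 := pvP_succ c j
        rcases Nat.eq_or_lt_of_le hjl with rfl | hlt
        · have := h.2; omega
        · have := ih4 l hlt hl; omega
      · intro hlt
        have hpj : pvP c (j + 1) = pvP c j + c.getD j 0 := pvP_succ c j
        have := ih5 hlt; omega
    case isFalse h =>
      dsimp only
      refine ⟨le_refl _, by ring, fun hj => hj, ?_, ?_⟩
      · intro l h1 h2; omega
      · intro hlt
        have hgt : ¬(cost + c.getD j 0 ≤ K) := fun hle => h ⟨hlt, hle⟩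
        have hpj : pvP c (j + 1) = pvP c j + c.getD j 0 := pvP_succ c j
        omega

-- lower bound: any m all of whose prefixes fit is ≤ the greedy end
theorem bExtendC_lower (c : List Int) (K : Int) (n j m fuel : Nat) (cost : Int)
    (hf : n ≤ j + fuel) (hjm : j ≤ m) (hmn : m ≤ n)
    (h : ∀ l, j ≤ l → l < m → cost + (pvP c (l + 1) - pvP c j) ≤ K) :
    m ≤ (bExtendC c K n fuel j cost).1 := by
  obtain ⟨h1, _, h3, _, h5⟩ := bExtendC_run c K n fuel j cost hf
  by_contra hlt
  have hlt2 : (bExtendC c K n fuel j cost).1 < m := by omega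
  have hrn : (bExtendC c K n fuel j cost).1 < n := by omega
  have := h5 hrn
  have := h _ h1 hlt2
  omega

-- greedy end of the inner loop started from i with zero cost
def pvG (c : List Int) (K : Int) (i : Nat) : Nat :=
  (bExtendC c K c.length (c.length - i) i 0).1

theorem pvG_ge (c : List Int) (K : Int) (i : Nat) (hi : i ≤ c.length) : i ≤ pvG c K i :=
  (bExtendC_run c K c.length (c.length - i) i 0 (by omega)).1

theorem pvG_le (c : List Int) (K : Int) (i : Nat) (hi : i ≤ c.length) : pvG c K i ≤ c.length :=
  (bExtendC_run c K c.length (c.length - i) i 0 (by omega)).2.2.1 hi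

theorem pvG_mono (c : List Int) (K : Int) (hc : ∀ x ∈ c, 0 ≤ x) (i : Nat) (hi : i < c.length) :
    pvG c K i ≤ pvG c K (i + 1) := by
  by_cases hg : pvG c K i ≤ i + 1
  · exact le_trans hg (pvG_ge c K (i + 1) (by omega))
  · obtain ⟨_, _, _, h4, _⟩ := bExtendC_run c K c.length (c.length - i) i 0 (by omega)
    apply bExtendC_lower c K c.length (i + 1) (pvG c K i) _ 0 (by omega) (by omega)
      (pvG_le c K i (by omega))
    intro l h1 h2
    have hK := h4 l (by omega) h2
    have hP : pvP c i ≤ pvP c (i + 1) := pvP_mono c hc (by omega)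
    omega

-- resuming the window extension mid-way reaches the same greedy end
theorem bExtendC_resume (c : List Int) (K : Int) (i j : Nat)
    (hij : i ≤ j) (hjg : j ≤ pvG c K i) (hin : i ≤ c.length) :
    (bExtendC c K c.length (c.length - j) j (pvP c j - pvP c i)).1 = pvG c K i := by
  have hgn : pvG c K i ≤ c.length := pvG_le c K i hin
  obtain ⟨gi1, _, _, gi4, gi5⟩ := bExtendC_run c K c.length (c.length - i) i 0 (by omega)
  obtain ⟨r1, _, r3, r4, _⟩ := bExtendC_run c K c.length (c.length - j) j (pvP c j - pvP c i) (by omega)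
  have hge : pvG c K i ≤ (bExtendC c K c.length (c.length - j) j (pvP c j - pvP c i)).1 := by
    apply bExtendC_lower c K c.length j _ _ _ (by omega) hjg hgn
    intro l h1 h2
    have := gi4 l (by omega) h2
    omega
  have hle : (bExtendC c K c.length (c.length - j) j (pvP c j - pvP c i)).1 ≤ pvG c K i := by
    by_contra hlt
    have hgu : pvG c K i = (bExtendC c K c.length (c.length - i) i 0).1 := rfl
    have hlt2 : pvG c K i < (bExtendC c K c.length (c.length - j) j (pvP c j - pvP c i)).1 := by
      omega
    have hrn : pvG c K i < c.length := by
      have := r3 (by omega); omega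
    rw [hgu] at hrn
    have h5 := gi5 hrn
    have h4 := r4 (pvG c K i) hjg hlt2
    rw [hgu] at h4
    omega
  omega

-- B's step expressed over the cost list (under Pre_, for i < n)
def bStepC (c : List Int) (K : Int) (n : Nat) (st : Nat × Int × Nat) (i : Nat) : Nat × Int × Nat :=
  let j0 := if st.1 < i then i else st.1
  let cost0 := if st.1 < i then 0 else st.2.1
  let e := bExtendC c K n (n - j0) j0 cost0
  let best := if st.2.2 < e.1 - i then e.1 - i else st.2.2
  let cost' := if i < e.1 then e.2 - c.getD i 0 else e.2
  (e.1, cost', best)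

theorem bStep_eq (sl tl : List Char) (K : Int) (hlen : sl.length ≤ tl.length)
    (st : Nat × Int × Nat) (i : Nat) (hi : i < sl.length) :
    bStep sl tl K sl.length st i = bStepC (pvC sl tl) K sl.length st i := by
  unfold bStep bStepC
  simp only [bExtend_costAt sl tl K hlen, pvCostAt_eq sl tl hlen i hi]

-- closed form of B's fold state after k iterations
def pvJ (c : List Int) (K : Int) (k : Nat) : Nat := if k = 0 then 0 else pvG c K (k - 1)

theorem bFold_inv (c : List Int) (K : Int) (hc : ∀ x ∈ c, 0 ≤ x) :
    ∀ k, k ≤ c.length →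
    (List.range k).foldl (bStepC c K c.length) (0, 0, 0) =
      (pvJ c K k,
       pvP c (pvJ c K k) - pvP c (min k (pvJ c K k)),
       (List.range k).foldl (fun m i => max m (pvG c K i - i)) 0) := by
  intro k
  induction k with
  | zero => intro _; simp [pvJ, pvP]
  | succ k ih =>
    intro hk
    rw [List.range_succ, List.foldl_append, List.foldl_append, ih (by omega)]
    have hGgek : k ≤ pvG c K k := pvG_ge c K k (by omega)
    have hGlen : pvG c K k ≤ c.length := pvG_le c K k (by omega)
    have hJ1 : pvJ c K (k + 1) = pvG c K k := by simp [pvJ]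
    have hJle : pvJ c K k ≤ pvG c K k := by
      unfold pvJ
      by_cases h0 : k = 0
      · subst h0; simp
      · rw [if_neg h0]
        have hm := pvG_mono c K hc (k - 1) (by omega)
        have hke : k - 1 + 1 = k := by omega
        rwa [hke] at hm
    simp only [List.foldl_cons, List.foldl_nil, bStepC]
    by_cases hcase : pvJ c K k < k
    · simp only [if_pos hcase]
      have hres := bExtendC_resume c K k k (le_refl k) hGgek (by omega)
      rw [sub_self] at hres
      obtain ⟨_, r2, _, _, _⟩ := bExtendC_run c K c.length (c.length - k) k 0 (by omega)
      rw [hres] at r2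
      refine Prod.ext ?_ (Prod.ext ?_ ?_)
      · rw [hres, hJ1]
      · rw [hres, r2, hJ1]
        by_cases hkg : k < pvG c K k
        · rw [if_pos hkg, min_eq_left (by omega : k + 1 ≤ pvG c K k), pvP_succ]
          ring
        · have hkeq : pvG c K k = k := by omega
          rw [if_neg hkg, hkeq, min_eq_right (by omega : k ≤ k + 1)]
          ring
      · dsimp only
        rw [hres]
        split <;> omega
    · simp only [if_neg hcase]
      have hmin : min k (pvJ c K k) = k := by omega
      rw [hmin]
      have hres := bExtendC_resume c K k (pvJ c K k) (by omega) hJle (by omega)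
      obtain ⟨_, r2, _, _, _⟩ := bExtendC_run c K c.length (c.length - pvJ c K k)
        (pvJ c K k) (pvP c (pvJ c K k) - pvP c k) (by omega)
      rw [hres] at r2
      refine Prod.ext ?_ (Prod.ext ?_ ?_)
      · rw [hres, hJ1]
      · rw [hres, r2, hJ1]
        by_cases hkg : k < pvG c K k
        · rw [if_pos hkg, min_eq_left (by omega : k + 1 ≤ pvG c K k), pvP_succ]
          ring
        · have hkeq : pvG c K k = k := by omega
          rw [if_neg hkg, hkeq, min_eq_right (by omega : k ≤ k + 1)]
          ring
      · dsimp only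
        rw [hres]
        split <;> omega

-- A's inner loop equals the cost-list extension (under Pre_)
theorem aGo_eq_bExtendC (sl tl : List Char) (K : Int) (hlen : sl.length ≤ tl.length) :
    ∀ fuel j cost,
    aGo sl tl K sl.length fuel j cost = (bExtendC (pvC sl tl) K sl.length fuel j cost).1 := by
  intro fuel
  induction fuel with
  | zero => intro j cost; simp [aGo, bExtendC]
  | succ fuel ih =>
    intro j cost
    rw [aGo, bExtendC]
    by_cases hj : j < sl.length
    · rw [pvCostAt_eq sl tl hlen j hj]
      split
      · exact ih (j + 1) _
      · rfl
    · have h1 : ¬(j < sl.length ∧ cost + pvCostAt sl tl j ≤ K) := by omega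
      have h2 : ¬(j < sl.length ∧ cost + (pvC sl tl).getD j 0 ≤ K) := by omega
      rw [if_neg h1, if_neg h2]

-- ===== VERDICT (by name: the statement is the Claim_ definition above) =====
theorem max_length_substring_spec : Claim_equal_max_length_substring := by
  intro s t K _ hpre
  unfold Pre_max_length_substring at hpre
  unfold Spec_max_length_substring max_length_substring max_length_substring_alt
  simp only
  have hcl : (pvC s.toList t.toList).length = s.toList.length := by
    simp only [pvC, List.length_zipWith]; omega
  have hc : ∀ x ∈ pvC s.toList t.toList, 0 ≤ x := by
    intro x hx
    obtain ⟨i, hi, hx⟩ := List.mem_iff_getElem.mp hx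
    simp only [pvC, List.getElem_zipWith] at hx
    rw [← hx]
    exact abs_nonneg _
  have hstep : (List.range s.toList.length).foldl (bStep s.toList t.toList K s.toList.length) (0, 0, 0)
      = (List.range s.toList.length).foldl (bStepC (pvC s.toList t.toList) K s.toList.length) (0, 0, 0) := by
    apply PySem.List.foldl_congr_mem
    intro acc i hi
    exact bStep_eq s.toList t.toList K hpre acc i (by simpa using List.mem_range.mp hi)
  rw [hstep, ← hcl, bFold_inv _ K hc _ (le_refl _), hcl]
  congr 1
  apply PySem.List.foldl_congr_mem
  intro acc i hi
  congr 1
  rw [aGo_eq_bExtendC s.toList t.toList K hpre (s.toList.length - i) i 0]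
  unfold pvG
  rw [hcl]
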